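-- pv_equiv track=rewrite | github.com/snowyegret23/Localize | AI THE SOMNIUM FILES - nirvanA Initiative/code_json_converter.py | _apply_variants_to_raw_match
-- ===== SOURCE A (Python) =====
-- from typing import Any, Iterable
--
-- def _apply_variants_to_raw_match(
--     seq: list[Any],
--     input_pos: int,
--     primary_text: str,
--     alias_texts: list[str],
-- ) -> int:
--     answer_pos = input_pos + 1
--     changed = 0
--
--     if seq[answer_pos] != primary_text:
--         seq[answer_pos] = primary_text
--         changed += 1
--
--     if not alias_texts:
--         return changed
--
--     insert_pos = answer_pos + 1
--
--     for alias in alias_texts: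
--         if alias == primary_text:
--             continue
--         alias_chunk = ["result", "input", alias]
--         seq[insert_pos:insert_pos] = alias_chunk
--         insert_pos += len(alias_chunk)
--         changed += 1
--
--     return changed
-- ===== SOURCE B (Python) =====
-- def _apply_variants_to_raw_match(seq, input_pos, primary_text, alias_texts):
--     answer_pos = input_pos + 1
--     changed = 0 if seq[answer_pos] == primary_text else 1
--     block = []
--     for a in alias_texts:
--         if a != primary_text:
--             block += ["result", "input", a]
--     seq[:] = seq[:answer_pos] + [primary_text] + block + seq[answer_pos + 1:]
--     return changed + len(alias_texts) - alias_texts.count(primary_text)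
-- ===== Notes on version B (the rewrite author's own statement) =====
-- stated objective: faster
-- what changed: B computes the returned count arithmetically as changed + len(alias_texts) - alias_texts.count(primary_text) instead of accumulating it in A's insertion loop, and rebuilds the list with one concatenation instead of A's per-alias in-place slice insertions.
import Mathlib
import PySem

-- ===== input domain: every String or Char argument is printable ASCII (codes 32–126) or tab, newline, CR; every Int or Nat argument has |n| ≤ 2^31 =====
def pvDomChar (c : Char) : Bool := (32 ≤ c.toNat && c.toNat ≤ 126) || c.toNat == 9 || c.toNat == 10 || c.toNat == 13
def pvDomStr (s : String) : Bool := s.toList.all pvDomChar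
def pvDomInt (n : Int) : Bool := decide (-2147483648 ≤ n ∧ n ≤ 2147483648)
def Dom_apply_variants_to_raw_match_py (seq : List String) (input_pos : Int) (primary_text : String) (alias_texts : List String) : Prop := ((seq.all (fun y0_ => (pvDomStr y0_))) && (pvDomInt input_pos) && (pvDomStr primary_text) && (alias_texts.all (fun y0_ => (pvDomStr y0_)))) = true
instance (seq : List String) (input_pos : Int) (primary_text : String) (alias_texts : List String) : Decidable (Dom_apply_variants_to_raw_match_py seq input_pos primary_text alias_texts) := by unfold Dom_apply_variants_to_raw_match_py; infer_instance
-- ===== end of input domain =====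

-- B returns changed + len(alias_texts) - alias_texts.count(primary_text) (closed form, no loop
-- accumulator) and rebuilds the list by one concatenation instead of A's per-alias slice inserts;
-- the equivalence proved here is about the RETURN value only (both Pythons also mutate seq).

-- ===== PORT A =====
-- A mutates seq (assignment and per-alias slice insertions); the mutations never affect the
-- returned count, so the port carries the loop state (insert_pos, changed) and returns changed.
def apply_variants_to_raw_match_py (seq : List String) (input_pos : Int) (primary_text : String) (alias_texts : List String) : Int :=
  let answer_pos := input_pos + 1
  match PySem.List.pyGet? seq answer_pos with
  | none => 0   -- IndexError in Python; excluded by Pre_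
  | some cur =>
    let changed : Int := if cur ≠ primary_text then 1 else 0
    if alias_texts.isEmpty then changed
    else
      (alias_texts.foldl
        (fun st al =>
          if al = primary_text then st          -- continue
          else (st.1 + 3, st.2 + 1))            -- insert chunk of length 3, bump insert_pos and changed
        ((answer_pos + 1 : Int), changed)).2

-- ===== PORT B =====
-- B's mutation (block-building loop and the rebuilding concatenation) does not touch the return
-- value, so the port is the arithmetic B returns.
def apply_variants_to_raw_match_py_alt (seq : List String) (input_pos : Int) (primary_text : String) (alias_texts : List String) : Int :=
  match PySem.List.pyGet? seq (input_pos + 1) with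
  | none => 0   -- IndexError in Python; excluded by Pre_
  | some cur =>
    let changed : Int := if cur = primary_text then 0 else 1
    changed + (alias_texts.length : Int) - (PySem.List.count alias_texts primary_text : Int)

-- ===== PRECONDITION & SPEC =====
-- A (and B) raise IndexError iff index input_pos + 1 is out of range for seq.
def Pre_apply_variants_to_raw_match_py (seq : List String) (input_pos : Int) (primary_text : String) (alias_texts : List String) : Prop :=
  PySem.Raise.InRange seq.length (input_pos + 1)
instance (seq : List String) (input_pos : Int) (primary_text : String) (alias_texts : List String) : Decidable (Pre_apply_variants_to_raw_match_py seq input_pos primary_text alias_texts) := by unfold Pre_apply_variants_to_raw_match_py; infer_instance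

def pvWitness_apply_variants_to_raw_match_py : List String × Int × String × List String := (["q", "old", "x"], 0, "new", ["a", "new", "b"])

def Spec_apply_variants_to_raw_match_py (seq : List String) (input_pos : Int) (primary_text : String) (alias_texts : List String) (out : Int) : Prop := out = apply_variants_to_raw_match_py_alt seq input_pos primary_text alias_texts
instance (seq : List String) (input_pos : Int) (primary_text : String) (alias_texts : List String) (out : Int) : Decidable (Spec_apply_variants_to_raw_match_py seq input_pos primary_text alias_texts out) := by unfold Spec_apply_variants_to_raw_match_py; infer_instance

-- ===== CLAIM (what is proved, stated in full; the proofs are below) =====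
def Claim_equal_apply_variants_to_raw_match_py : Prop := ∀ (seq : List String) (input_pos : Int) (primary_text : String) (alias_texts : List String), Dom_apply_variants_to_raw_match_py seq input_pos primary_text alias_texts → Pre_apply_variants_to_raw_match_py seq input_pos primary_text alias_texts → Spec_apply_variants_to_raw_match_py seq input_pos primary_text alias_texts (apply_variants_to_raw_match_py seq input_pos primary_text alias_texts)

-- ===== LEMMAS AND PROOFS =====
-- A's loop state (insert_pos, changed): the second component equals changed plus the number of
-- aliases different from primary_text, i.e. changed + length - count.
theorem fold_snd_eq_len_sub_count (p : String) (l : List String) :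
    ∀ (ip c : Int),
      (l.foldl (fun st al => if al = p then st else (st.1 + 3, st.2 + 1)) (ip, c)).2
        = c + (l.length : Int) - (l.count p : Int) := by
  induction l with
  | nil => intro ip c; simp
  | cons a l ih =>
    intro ip c
    by_cases h : a = p <;>
      simp [h, List.foldl, ih] <;> ring

theorem apply_variants_witness_ok :
    Dom_apply_variants_to_raw_match_py pvWitness_apply_variants_to_raw_match_py.1 pvWitness_apply_variants_to_raw_match_py.2.1 pvWitness_apply_variants_to_raw_match_py.2.2.1 pvWitness_apply_variants_to_raw_match_py.2.2.2 ∧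
    Pre_apply_variants_to_raw_match_py pvWitness_apply_variants_to_raw_match_py.1 pvWitness_apply_variants_to_raw_match_py.2.1 pvWitness_apply_variants_to_raw_match_py.2.2.1 pvWitness_apply_variants_to_raw_match_py.2.2.2 := by
  decide

-- ===== VERDICT (by name: the statement is the Claim_ definition above) =====
theorem apply_variants_to_raw_match_py_spec : Claim_equal_apply_variants_to_raw_match_py := by
  intro seq input_pos primary_text alias_texts _ hpre
  unfold Spec_apply_variants_to_raw_match_py apply_variants_to_raw_match_py apply_variants_to_raw_match_py_alt
  cases hget : PySem.List.pyGet? seq (input_pos + 1) with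
  | none => exact absurd hpre ((PySem.List.pyGet?_eq_none_iff (xs := seq) (i := input_pos + 1)).mp hget)
  | some cur =>
    simp only [hget]
    cases halias : alias_texts with
    | nil => by_cases h : cur = primary_text <;> simp [h, PySem.List.count]
    | cons a l =>
      simp only [List.isEmpty_cons]
      rw [fold_snd_eq_len_sub_count]
      by_cases h : cur = primary_text <;> simp [h, PySem.List.count]
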